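-- pv_equiv track=rewrite | github.com/iremyk/Comp430_Project | skeleton.py | is_generalized
-- ===== SOURCE A (Python) =====
-- def is_generalized(EC: list, node: str) -> bool:
--     """ Get the list of EC dicts and the node name where the generalization will be checked
--     and return true if it is generalized.
--
--     Args:
--         EC (list): list of EC dicts.
--         node (str): the node name where the generalization will be checked.
--
--     Returns:
--         bool: true if it is generalized.
--     """
--
--     is_generalize = True
--     base_row = EC[0].get(node)
--
--     if (base_row == 'Any'):
--         return is_generalize
--     else:
--         for row in EC[1:]:
--             if (row.get(node) != base_row):
--                 is_generalize = False
--                 break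
--
--     return is_generalize
-- ===== SOURCE B (Python) =====
-- def is_generalized(EC: list, node: str) -> bool:
--     if EC[0].get(node) == 'Any':
--         return True
--     # chain comparison: each row agrees with its successor; by transitivity all agree
--     return all(a.get(node) == b.get(node) for a, b in zip(EC, EC[1:]))
-- ===== Notes on version B (the rewrite author's own statement) =====
-- stated objective: alternative
-- what changed: Replaces the flag-and-break loop comparing every row's value to the stored base row by a chain check over adjacent pairs zip(EC, EC[1:]) (each row compared to its successor, correct by transitivity of equality), with no base value carried through the scan.
import Mathlib
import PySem

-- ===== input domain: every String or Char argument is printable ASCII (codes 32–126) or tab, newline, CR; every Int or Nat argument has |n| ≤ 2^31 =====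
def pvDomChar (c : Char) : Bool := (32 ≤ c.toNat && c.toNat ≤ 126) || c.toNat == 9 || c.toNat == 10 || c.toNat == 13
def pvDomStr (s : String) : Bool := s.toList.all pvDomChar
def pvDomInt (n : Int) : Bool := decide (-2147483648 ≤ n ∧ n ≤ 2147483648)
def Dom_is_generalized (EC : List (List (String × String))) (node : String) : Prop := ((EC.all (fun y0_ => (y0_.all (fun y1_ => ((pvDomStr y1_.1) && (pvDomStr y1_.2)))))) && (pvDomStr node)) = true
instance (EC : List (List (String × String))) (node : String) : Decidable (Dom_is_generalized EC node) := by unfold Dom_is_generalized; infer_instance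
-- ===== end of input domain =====

-- B is an alternative: it checks each adjacent pair of rows via zip(EC, EC[1:])
-- (correct by transitivity of equality) instead of A's flag-and-break loop
-- comparing every row to the base row.
-- ===== PORT A =====
-- the for-loop with break: false at the first row whose value differs from base, true if none does
def is_generalized_loopA (node : String) (base : Option String) : List (List (String × String)) → Bool
  | [] => true
  | r :: rs =>
    if PySem.Dict.get? (PySem.Dict.mk r) node ≠ base then false
    else is_generalized_loopA node base rs

def is_generalized (EC : List (List (String × String))) (node : String) : Bool :=
  match PySem.List.pyGet? EC 0 with
  | none => false  -- EC[0] raises IndexError; excluded by Pre_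
  | some r0 =>
    let base_row := PySem.Dict.get? (PySem.Dict.mk r0) node
    if base_row = some "Any" then true
    else is_generalized_loopA node base_row (PySem.List.slice EC (some 1) none)

-- ===== PORT B =====
def is_generalized_alt (EC : List (List (String × String))) (node : String) : Bool :=
  match PySem.List.pyGet? EC 0 with
  | none => false  -- EC[0] raises IndexError; excluded by Pre_
  | some r0 =>
    if PySem.Dict.get? (PySem.Dict.mk r0) node = some "Any" then true
    else (EC.zip (PySem.List.slice EC (some 1) none)).all
      (fun p => PySem.Dict.get? (PySem.Dict.mk p.1) node == PySem.Dict.get? (PySem.Dict.mk p.2) node)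

-- ===== PRECONDITION & SPEC =====
-- Pre_ excludes only EC = [], where A raises IndexError on EC[0].
def Pre_is_generalized (EC : List (List (String × String))) (node : String) : Prop := EC ≠ []
instance (EC : List (List (String × String))) (node : String) : Decidable (Pre_is_generalized EC node) := by unfold Pre_is_generalized; infer_instance
def pvWitness_is_generalized : (List (List (String × String))) × String := ([[("a", "x")], [("a", "x")]], "a")

def Spec_is_generalized (EC : List (List (String × String))) (node : String) (out : Bool) : Prop := out = is_generalized_alt EC node
instance (EC : List (List (String × String))) (node : String) (out : Bool) : Decidable (Spec_is_generalized EC node out) := by unfold Spec_is_generalized; infer_instance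

-- ===== CLAIM (what is proved, stated in full; the proofs are below) =====
def Claim_equal_is_generalized : Prop := ∀ (EC : List (List (String × String))) (node : String), Dom_is_generalized EC node → Pre_is_generalized EC node → Spec_is_generalized EC node (is_generalized EC node)

-- ===== LEMMAS AND PROOFS =====

-- A's loop is "all values equal base"
theorem loopA_eq_all (node : String) (base : Option String) (rs : List (List (String × String))) :
    is_generalized_loopA node base rs = rs.all (fun r => PySem.Dict.get? (PySem.Dict.mk r) node == base) := by
  induction rs with
  | nil => rfl
  | cons r rs ih =>
    simp only [is_generalized_loopA, List.all_cons, ih]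
    by_cases h : PySem.Dict.get? (PySem.Dict.mk r) node = base <;> simp [h]

-- chain comparison over adjacent pairs equals comparison of every tail element to the head value
theorem chain_eq_all_base (f : List (String × String) → Option String)
    (r0 : List (String × String)) (rest : List (List (String × String))) :
    ((r0 :: rest).zip rest).all (fun p => f p.1 == f p.2)
      = rest.all (fun r => f r == f r0) := by
  induction rest generalizing r0 with
  | nil => rfl
  | cons r1 rs ih =>
    simp only [List.zip_cons_cons, List.all_cons, ih r1]
    by_cases h : f r0 = f r1
    · rw [h]
    · have h0 : (f r0 == f r1) = false := beq_false_of_ne h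
      have h1 : (f r1 == f r0) = false := beq_false_of_ne (fun e => h e.symm)
      rw [h0, h1, Bool.false_and, Bool.false_and]

-- ===== VERDICT (by name: the statement is the Claim_ definition above) =====
theorem is_generalized_spec : Claim_equal_is_generalized := by
  intro EC node _ hpre
  unfold Spec_is_generalized
  match EC with
  | [] => exact absurd rfl hpre
  | r0 :: rest =>
    simp only [is_generalized, is_generalized_alt, PySem.List.pyGet?]
    norm_num [PySem.List.pyIdx?]
    have hslice : PySem.List.slice (r0 :: rest) (some 1) none = rest := by
      simp [PySem.List.slice_from]
    rw [hslice]
    by_cases hAny : PySem.Dict.get? (PySem.Dict.mk r0) node = some "Any"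
    · simp [hAny]
    · simp only [hAny]
      rw [loopA_eq_all,
        chain_eq_all_base (fun r => PySem.Dict.get? (PySem.Dict.mk r) node) r0 rest]
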